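-- pv_equiv track=rewrite | github.com/DCalhas/eeg_to_fmri | src/gen_dims_utils.py | get_possible_kernel_size_conv
-- ===== SOURCE A (Python) =====
-- def get_possible_kernel_size_conv(input_shape, output_shape):
-- 	#list of tuples where #1 is kernel size and #2 is stride size
-- 	possible_combinations = []
--
-- 	for stride in range(1, input_shape):
-- 		for kernel in range(1, input_shape):
--
-- 			#new_dim = conv_utils.conv_output_length(input_shape,
-- 				#kernel,
-- 				#padding='valid',
-- 				#stride=stride)
--
-- 			#only accept dim = output desired and that are bigger than half the
-- 			if( ((input_shape - kernel + stride) // stride) == output_shape and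
-- 				kernel >= stride):
-- 				possible_combinations += [(kernel, stride)]
-- 				#fix this, it takes to much time trying it for all the points
-- 				#wrapper to return first valid kernel and stride combination
-- 				return possible_combinations
--
-- 	return possible_combinations
-- ===== SOURCE B (Python) =====
-- def get_possible_kernel_size_conv(input_shape, output_shape):
-- 	# For each stride, solve the floor equation algebraically:
-- 	# (input - kernel + stride)//stride == output  <=>  L < kernel <= L + stride, L = input - stride*output.
-- 	# First valid kernel scanned by ascending order (with kernel >= stride) is max(L+1, stride).
-- 	for stride in range(1, input_shape):
-- 		L = input_shape - stride * output_shape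
-- 		k = max(L + 1, stride)
-- 		if k <= min(L + stride, input_shape - 1):
-- 			return [(k, stride)]
-- 	return []
-- ===== Notes on version B (the rewrite author's own statement) =====
-- stated objective: faster
-- what changed: B removes A's inner brute-force scan over all kernel sizes by solving the floor-division equation algebraically per stride (kernel must lie in (L, L+stride] with L = input - stride*output), returning the first stride whose interval intersects the valid kernel range.
import Mathlib
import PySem

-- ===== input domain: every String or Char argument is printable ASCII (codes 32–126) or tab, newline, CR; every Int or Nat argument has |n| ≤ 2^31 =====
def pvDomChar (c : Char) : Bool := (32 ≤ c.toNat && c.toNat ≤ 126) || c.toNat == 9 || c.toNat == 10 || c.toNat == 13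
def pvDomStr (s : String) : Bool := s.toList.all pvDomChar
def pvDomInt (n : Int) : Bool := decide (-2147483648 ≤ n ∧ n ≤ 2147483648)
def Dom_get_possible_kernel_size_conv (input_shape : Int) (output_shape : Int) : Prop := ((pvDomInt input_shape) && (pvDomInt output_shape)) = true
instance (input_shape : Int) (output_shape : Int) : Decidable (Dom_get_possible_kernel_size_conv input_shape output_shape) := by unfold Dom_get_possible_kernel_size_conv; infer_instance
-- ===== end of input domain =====

-- B replaces A's inner brute-force kernel scan by solving the floor equation per stride in O(1): alternative/faster re-implementation, same return value.


-- ===== PORT A =====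
-- inner 'for kernel in range(1, input_shape)' with early return
def pvAkern (i o s : Int) : List Int → Option (Int × Int)
  | [] => none
  | k :: ks =>
    if PySem.Int.floordiv (i - k + s) s = o ∧ s ≤ k then some (k, s)
    else pvAkern i o s ks

-- outer 'for stride in range(1, input_shape)'
def pvAstride (i o : Int) : List Int → Option (Int × Int)
  | [] => none
  | s :: ss =>
    match pvAkern i o s (PySem.List.pyRange 1 i 1) with
    | some p => some p
    | none => pvAstride i o ss

def get_possible_kernel_size_conv (input_shape : Int) (output_shape : Int) : List (Int × Int) :=
  match pvAstride input_shape output_shape (PySem.List.pyRange 1 input_shape 1) with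
  | some p => [p]
  | none => []

-- ===== PORT B =====
def pvBloop (i o : Int) : List Int → List (Int × Int)
  | [] => []
  | s :: ss =>
    let L := i - s * o
    let k := max (L + 1) s
    if k ≤ min (L + s) (i - 1) then [(k, s)] else pvBloop i o ss

def get_possible_kernel_size_conv_alt (input_shape : Int) (output_shape : Int) : List (Int × Int) :=
  pvBloop input_shape output_shape (PySem.List.pyRange 1 input_shape 1)

-- ===== PRECONDITION & SPEC =====
def Spec_get_possible_kernel_size_conv (input_shape : Int) (output_shape : Int) (out : List (Int × Int)) : Prop := out = get_possible_kernel_size_conv_alt input_shape output_shape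
instance (input_shape : Int) (output_shape : Int) (out : List (Int × Int)) : Decidable (Spec_get_possible_kernel_size_conv input_shape output_shape out) := by unfold Spec_get_possible_kernel_size_conv; infer_instance

-- ===== CLAIM (what is proved, stated in full; the proofs are below) =====
def Claim_equal_get_possible_kernel_size_conv : Prop := ∀ (input_shape : Int) (output_shape : Int), Dom_get_possible_kernel_size_conv input_shape output_shape → Spec_get_possible_kernel_size_conv input_shape output_shape (get_possible_kernel_size_conv input_shape output_shape)

-- ===== LEMMAS AND PROOFS =====

-- First hit of an interval predicate while scanning range(a, b) left to right.
lemma pvAkern_scan (i o s lo hi : Int)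
    (hiff : ∀ k : Int, (PySem.Int.floordiv (i - k + s) s = o ∧ s ≤ k) ↔ (lo ≤ k ∧ k ≤ hi)) :
    ∀ (n : Nat) (a b : Int), (b - a).toNat = n →
    pvAkern i o s (PySem.List.pyRange a b 1) =
      (if max lo a ≤ min hi (b - 1) then some (max lo a, s) else none) := by
  intro n
  induction n with
  | zero =>
    intro a b h
    rw [PySem.List.pyRange_one_eq_nil (by omega), if_neg (by omega)]
    rfl
  | succ n ih =>
    intro a b h
    rw [PySem.List.pyRange_one_cons (by omega)]
    simp only [pvAkern]
    by_cases hp : lo ≤ a ∧ a ≤ hi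
    · rw [if_pos ((hiff a).mpr hp), if_pos (by omega),
        show max lo a = a from by omega]
    · rw [if_neg (fun hc => hp ((hiff a).mp hc)), ih (a + 1) b (by omega)]
      by_cases h2 : lo ≤ a
      · rw [if_neg (by omega), if_neg (by omega)]
      · rw [show max lo (a + 1) = max lo a from by omega]

-- The predicate of A's inner loop is an interval.
lemma pvAkern_pred_iff (i o s : Int) (hs : 0 < s) (k : Int) :
    (PySem.Int.floordiv (i - k + s) s = o ∧ s ≤ k)
      ↔ (max (i - s * o + 1) s ≤ k ∧ k ≤ i - s * o + s) := by
  rw [PySem.Int.floordiv_eq_iff_of_pos hs]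
  constructor
  · rintro ⟨⟨h1, h2⟩, h3⟩
    exact ⟨max_le (by linarith) h3, by linarith⟩
  · rintro ⟨h1, h2⟩
    have hlo1 : i - s * o + 1 ≤ k := le_trans (le_max_left _ _) h1
    have hlo2 : s ≤ k := le_trans (le_max_right _ _) h1
    exact ⟨⟨by linarith, by linarith⟩, hlo2⟩

-- A's whole inner loop equals B's closed form for one stride.
lemma pvAkern_closed (i o s : Int) (hs : 0 < s) :
    pvAkern i o s (PySem.List.pyRange 1 i 1) =
      (if max (i - s * o + 1) s ≤ min (i - s * o + s) (i - 1)
       then some (max (i - s * o + 1) s, s) else none) := by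
  rw [pvAkern_scan i o s (max (i - s * o + 1) s) (i - s * o + s)
        (pvAkern_pred_iff i o s hs) (i - 1).toNat 1 i (by omega),
      show max (max (i - s * o + 1) s) 1 = max (i - s * o + 1) s from by omega]

-- The two outer loops agree on any list of positive strides.
lemma pvLoops_eq (i o : Int) :
    ∀ ss : List Int, (∀ s ∈ ss, 0 < s) →
      (match pvAstride i o ss with
       | some p => [p]
       | none => []) = pvBloop i o ss := by
  intro ss
  induction ss with
  | nil => intro _; rfl
  | cons s ss ih =>
    intro hpos
    have hs : 0 < s := hpos s (List.mem_cons_self ..)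
    simp only [pvAstride, pvBloop, pvAkern_closed i o s hs]
    by_cases hc : max (i - s * o + 1) s ≤ min (i - s * o + s) (i - 1)
    · rw [if_pos hc, if_pos hc]
    · rw [if_neg hc, if_neg hc]
      exact ih (fun t ht => hpos t (List.mem_cons_of_mem _ ht))

-- ===== VERDICT (by name: the statement is the Claim_ definition above) =====
theorem get_possible_kernel_size_conv_spec : Claim_equal_get_possible_kernel_size_conv := by
  intro i o _
  show get_possible_kernel_size_conv i o = get_possible_kernel_size_conv_alt i o
  unfold get_possible_kernel_size_conv get_possible_kernel_size_conv_alt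
  exact pvLoops_eq i o _ (fun s hs => by
    have := (PySem.List.mem_pyRange_one).mp hs
    omega)
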